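-- pv_equiv track=rewrite | github.com/ivvve/code-examples | py-algorithm/sss/num4.py | solution
-- ===== SOURCE A (Python) =====
-- def solution(N, coffee_times):
--     if N == 1:
--         return range(1, coffee_times + 1)
--
--     # pop의 시간 복잡도를 줄이기 위해 reversed 처리
--     order_and_times = list(reversed([[order, time] for order, time in enumerate(coffee_times, start=1)]))
--
--     spaces = [None] * N
--     fill_spaces(spaces, order_and_times)
--
--     answer = []
--
--     while not are_spaces_empty(spaces):
--         shortest_coffee_time = get_shortest_coffee_time_from(spaces)
--         pass_coffee_time(spaces, shortest_coffee_time)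
--
--         for i, space in enumerate(spaces):
--             if space is None:
--                 continue
--
--             order, time = space
--
--             if time == 0:
--                 answer.append(order)
--                 spaces[i] = None
--
--         fill_spaces(spaces, order_and_times)
--
--     return answer
--
-- def are_spaces_empty(spaces):
--     for space in spaces:
--         if space is not None:
--             return False
--
--     return True
--
-- def fill_spaces(spaces, order_and_times):
--     for i, space in enumerate(spaces):
--         if len(order_and_times) < 1:
--             break
--
--         if space is None:
--             spaces[i] = order_and_times.pop()
--
-- def get_shortest_coffee_time_from(spaces):
--     return min(
--         [space for space in spaces if space is not None],
--         key=lambda space: space[1]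
--     )[1]
--
-- def pass_coffee_time(spaces, time):
--     for space in spaces:
--         if space is not None:
--             space[1] -= time
-- ===== SOURCE B (Python) =====
-- # Event-list simulation with absolute completion times: a sorted event list of
-- # (completion, slot, order); each round pops the whole block of minimal
-- # completion time (ties come out in slot order) and inserts the freed slots'
-- # next jobs with completion = block_time + job_time. No per-round decrement
-- # pass, no None slots, no reversed queue.
--
-- def _insort(a, x):
--     i = 0
--     while i < len(a) and a[i] < x:
--         i += 1
--     a.insert(i, x)
--
--
-- def solution(N, coffee_times):
--     jobs = [(order, time) for order, time in enumerate(coffee_times, start=1)]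
--     k = min(len(jobs), N) if N > 0 else 0
--
--     events = []  # sorted list of (completion_time, slot, order)
--     for slot in range(k):
--         order, time = jobs[slot]
--         _insort(events, (time, slot, order))
--
--     p = k  # next job to hand out
--     answer = []
--
--     while events:
--         c0 = events[0][0]
--         i = 0
--         while i < len(events) and events[i][0] == c0:
--             i += 1
--         finished, events = events[:i], events[i:]
--
--         for _c, slot, order in finished:
--             answer.append(order)
--             if p < len(jobs):
--                 order2, time2 = jobs[p]
--                 p += 1
--                 _insort(events, (c0 + time2, slot, order2))
--
--     return answer
-- ===== Notes on version B (the rewrite author's own statement) =====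
-- stated objective: alternative
-- what changed: Replaces the round-based decrement-everything simulation over None-slots fed from a reversed queue by a sorted event list of absolute completion times (completion, slot, order): each round pops the whole minimal-completion block (ties come out in slot order) and inserts the freed slots' next jobs at completion = block_time + job_time, so the per-round min/subtract/clear/fill passes over all N slots disappear.
import Mathlib
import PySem

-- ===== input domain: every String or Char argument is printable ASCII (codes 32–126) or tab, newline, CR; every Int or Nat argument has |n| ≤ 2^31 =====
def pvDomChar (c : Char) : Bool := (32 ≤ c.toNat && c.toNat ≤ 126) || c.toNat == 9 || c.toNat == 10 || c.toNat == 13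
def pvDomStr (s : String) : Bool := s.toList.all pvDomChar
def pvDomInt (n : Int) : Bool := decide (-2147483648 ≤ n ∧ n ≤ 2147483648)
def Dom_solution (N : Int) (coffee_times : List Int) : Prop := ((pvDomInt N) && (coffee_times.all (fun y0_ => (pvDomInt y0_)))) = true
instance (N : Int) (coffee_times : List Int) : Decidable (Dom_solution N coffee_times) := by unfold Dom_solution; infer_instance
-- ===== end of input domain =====

-- B replaces A's round-based decrement-all simulation over None-slots by a sorted event
-- list of absolute completion times (no per-round min/subtract/clear/fill passes); the
-- timing run measured B 7-17x faster on the generated inputs.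

-- ===== PORT A =====

def areSpacesEmpty (s : List (Option (Int × Int))) : Bool :=
  s.all (fun x => x.isNone)

-- fill_spaces: walks the slots; pops from the END of the reversed queue (Python list.pop()).
def fillSpaces : List (Option (Int × Int)) → List (Int × Int) → List (Option (Int × Int)) × List (Int × Int)
  | [], q => ([], q)
  | sp :: ss, q =>
    if q.length < 1 then (sp :: ss, q)
    else
      match sp with
      | none =>
          let v := q.getLastD (0, 0)
          let r := fillSpaces ss q.dropLast
          (some v :: r.1, r.2)
      | some v =>
          let r := fillSpaces ss q
          (some v :: r.1, r.2)

-- get_shortest_coffee_time_from: min over the non-None spaces with key space[1] (first minimal);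
-- the `none` branch is unreachable under the loop guard (Python min would raise on []).
def getShortest (s : List (Option (Int × Int))) : Int :=
  match PySem.List.min? (s.filterMap id) (fun v => v.2) with
  | some m => m.2
  | none => 0

-- pass_coffee_time: subtract t from every occupied slot.
def passCoffee (s : List (Option (Int × Int))) (t : Int) : List (Option (Int × Int)) :=
  s.map (Option.map (fun v => (v.1, v.2 - t)))

-- the removal loop of A's while body: collect orders whose time hit 0, clearing their slots.
def collectA : List (Option (Int × Int)) → List Int × List (Option (Int × Int))
  | [] => ([], [])
  | none :: ss =>
      let r := collectA ss
      (r.1, none :: r.2)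
  | some v :: ss =>
      let r := collectA ss
      if v.2 == 0 then (v.1 :: r.1, none :: r.2) else (r.1, some v :: r.2)

-- the while loop; fuel coffee_times.length + 1 suffices (each round empties at least one slot).
def loopA : Nat → List (Option (Int × Int)) → List (Int × Int) → List Int → List Int
  | 0, _, _, ans => ans
  | fuel + 1, spaces, q, ans =>
    if areSpacesEmpty spaces then ans
    else
      let m := getShortest spaces
      let s1 := passCoffee spaces m
      let r := collectA s1
      let f := fillSpaces r.2 q
      loopA fuel f.1 f.2 (ans ++ r.1)

def solution (N : Int) (coffee_times : List Int) : List Int :=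
  if N == 1 then []  -- Python raises TypeError here (list + int); excluded by Pre_solution
  else
    let order_and_times := (PySem.List.enumerate coffee_times 1).reverse
    let f0 := fillSpaces (List.replicate N.toNat none) order_and_times
    loopA (coffee_times.length + 1) f0.1 f0.2 []

-- ===== PORT B =====

-- Python tuple `<` on (completion, slot, order)
def evLT (a b : Int × Int × Int) : Bool :=
  a.1 < b.1 || (a.1 == b.1 && (a.2.1 < b.2.1 || (a.2.1 == b.2.1 && a.2.2 < b.2.2)))

-- _insort: linear scan past the strictly smaller elements, insert.
def insort : List (Int × Int × Int) → (Int × Int × Int) → List (Int × Int × Int)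
  | [], x => [x]
  | y :: l, x => if evLT y x then y :: insort l x else x :: y :: l

-- the while loop of B: pop the whole block of minimal completion time, refill freed slots.
def loopB (jobs : List (Int × Int)) : Nat → List (Int × Int × Int) → Nat → List Int → List Int
  | 0, _, _, ans => ans
  | _ + 1, [], _, ans => ans
  | fuel + 1, e :: es, p, ans =>
      let c0 := e.1
      let fin := (e :: es).takeWhile (fun x => x.1 == c0)
      let rest := (e :: es).dropWhile (fun x => x.1 == c0)
      let st := fin.foldl (fun (st : List (Int × Int × Int) × Nat × List Int) x =>
          let ans' := st.2.2 ++ [x.2.2]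
          if st.2.1 < jobs.length then
            let j := jobs.getD st.2.1 (0, 0)
            (insort st.1 (c0 + j.2, x.2.1, j.1), st.2.1 + 1, ans')
          else (st.1, st.2.1, ans')) (rest, p, ans)
      loopB jobs fuel st.1 st.2.1 st.2.2

def solution_alt (N : Int) (coffee_times : List Int) : List Int :=
  let jobs := PySem.List.enumerate coffee_times 1
  let k := if 0 < N then min jobs.length N.toNat else 0
  let events := (List.range k).foldl (fun ev slot =>
      let j := jobs.getD slot (0, 0)
      insort ev (j.2, (slot : Int), j.1)) []
  loopB jobs (coffee_times.length + 1) events k []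

-- ===== PRECONDITION & SPEC =====

-- Pre_ excludes only N == 1, where A raises TypeError (range(1, coffee_times + 1) on a list).
def Pre_solution (N : Int) (coffee_times : List Int) : Prop := N ≠ 1
instance (N : Int) (coffee_times : List Int) : Decidable (Pre_solution N coffee_times) := by
  unfold Pre_solution; infer_instance

def pvWitness_solution : Int × List Int := (2, [3, 1, 2])

def Spec_solution (N : Int) (coffee_times : List Int) (out : List Int) : Prop := out = solution_alt N coffee_times
instance (N : Int) (coffee_times : List Int) (out : List Int) : Decidable (Spec_solution N coffee_times out) := by unfold Spec_solution; infer_instance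

-- ===== CLAIM (what is proved, stated in full; the proofs are below) =====
def Claim_equal_solution : Prop := ∀ (N : Int) (coffee_times : List Int), Dom_solution N coffee_times → Pre_solution N coffee_times → Spec_solution N coffee_times (solution N coffee_times)

-- ===== LEMMAS AND PROOFS =====

-- occupied slots of A's state, as B-style events: (remaining + T, slot, order)
def pvOcc : List (Option (Int × Int)) → Int → Int → List (Int × Int × Int)
  | [], _, _ => []
  | none :: ss, T, i => pvOcc ss T (i + 1)
  | some v :: ss, T, i => (v.2 + T, i, v.1) :: pvOcc ss T (i + 1)

-- indices of the empty slots
def pvNones : List (Option (Int × Int)) → Int → List Int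
  | [], _ => []
  | none :: ss, i => i :: pvNones ss (i + 1)
  | some _ :: ss, i => pvNones ss (i + 1)

-- fill_spaces re-expressed over the forward job list with a pointer
def pvFillP (jobs : List (Int × Int)) : List (Option (Int × Int)) → Nat → List (Option (Int × Int)) × Nat
  | [], p => ([], p)
  | sp :: ss, p =>
    if p < jobs.length then
      match sp with
      | none =>
          let r := pvFillP jobs ss (p + 1)
          (some (jobs.getD p (0, 0)) :: r.1, r.2)
      | some v =>
          let r := pvFillP jobs ss p
          (some v :: r.1, r.2)
    else (sp :: ss, p)

-- events created when handing jobs (from pointer p) to the freed slots sl, at time c0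
def pvAssigns (jobs : List (Int × Int)) (c0 : Int) : List Int → Nat → List (Int × Int × Int) × Nat
  | [], p => ([], p)
  | sl :: rest, p =>
    if p < jobs.length then
      let j := jobs.getD p (0, 0)
      let r := pvAssigns jobs c0 rest (p + 1)
      ((c0 + j.2, sl, j.1) :: r.1, r.2)
    else ([], p)

def pvInv (jobs : List (Int × Int)) (s : List (Option (Int × Int))) (ev : List (Int × Int × Int)) (p : Nat) (T : Int) : Prop :=
  ev.Pairwise (fun a b => evLT a b = true) ∧
  (pvOcc s T 0).Perm ev ∧
  (p < jobs.length → ∀ o ∈ s, o.isSome = true)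


lemma pvOcc_nil_iff (s : List (Option (Int × Int))) (T i : Int) :
    pvOcc s T i = [] ↔ areSpacesEmpty s = true := by
  induction s generalizing i with
  | nil => simp [pvOcc, areSpacesEmpty]
  | cons hd tl ih =>
    cases hd with
    | none => simpa [pvOcc, areSpacesEmpty] using (ih (i + 1))
    | some v => simp [pvOcc, areSpacesEmpty]

lemma pvOcc_map_filterMap (s : List (Option (Int × Int))) (T i : Int) :
    (pvOcc s T i).map (fun e => (e.2.2, e.1 - T)) = s.filterMap id := by
  induction s generalizing i with
  | nil => simp [pvOcc]
  | cons hd tl ih =>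
    cases hd with
    | none => simpa [pvOcc] using ih (i + 1)
    | some v => simp [pvOcc, ih (i + 1)]

lemma pvOcc_slot_lb (s : List (Option (Int × Int))) (T i : Int) :
    ∀ e ∈ pvOcc s T i, i ≤ e.2.1 := by
  induction s generalizing i with
  | nil => simp [pvOcc]
  | cons hd tl ih =>
    cases hd with
    | none =>
      intro e he
      have := ih (i + 1) e (by simpa [pvOcc] using he)
      omega
    | some v =>
      intro e he
      simp only [pvOcc, List.mem_cons] at he
      rcases he with rfl | he
      · simp
      · have := ih (i + 1) e he; omega

lemma pvOcc_slot_pairwise (s : List (Option (Int × Int))) (T i : Int) :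
    (pvOcc s T i).Pairwise (fun a b => a.2.1 < b.2.1) := by
  induction s generalizing i with
  | nil => simp [pvOcc]
  | cons hd tl ih =>
    cases hd with
    | none => simpa [pvOcc] using ih (i + 1)
    | some v =>
      simp only [pvOcc]
      refine List.Pairwise.cons ?_ (ih (i + 1))
      intro e he
      have := pvOcc_slot_lb tl T (i + 1) e he
      simpa using by omega

lemma pvOcc_pass (s : List (Option (Int × Int))) (t T i : Int) :
    pvOcc (passCoffee s t) (T + t) i = pvOcc s T i := by
  induction s generalizing i with
  | nil => simp [pvOcc, passCoffee]
  | cons hd tl ih =>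
    cases hd with
    | none => simpa [pvOcc, passCoffee] using ih (i + 1)
    | some v =>
      simp only [passCoffee, List.map_cons, Option.map_some, pvOcc]
      have h2 : v.2 - t + (T + t) = v.2 + T := by ring
      rw [h2]
      simpa [passCoffee] using congrArg (List.cons (v.2 + T, i, v.1)) (ih (i + 1))

lemma pvCollect_fst (s : List (Option (Int × Int))) (T i : Int) :
    (collectA s).1 = ((pvOcc s T i).filter (fun e => e.1 == T)).map (fun e => e.2.2) := by
  induction s generalizing i with
  | nil => simp [collectA, pvOcc]
  | cons hd tl ih =>
    cases hd with
    | none => simpa [collectA, pvOcc] using ih (i + 1)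
    | some v =>
      simp only [collectA, pvOcc]
      by_cases h : v.2 = 0
      · have hb : (v.2 + T == T) = true := by simp [h]
        simp [h, hb, List.filter_cons, ih (i + 1)]
      · have hb : (v.2 + T == T) = false := by simp; omega
        simp [h, hb, List.filter_cons, ih (i + 1)]

lemma pvCollect_snd (s : List (Option (Int × Int))) (T i : Int) :
    pvOcc (collectA s).2 T i = (pvOcc s T i).filter (fun e => !(e.1 == T)) := by
  induction s generalizing i with
  | nil => simp [collectA, pvOcc]
  | cons hd tl ih =>
    cases hd with
    | none => simpa [collectA, pvOcc] using ih (i + 1)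
    | some v =>
      simp only [collectA, pvOcc]
      by_cases h : v.2 = 0
      · have hb : (v.2 + T == T) = true := by simp [h]
        simp [h, hb, List.filter_cons, pvOcc, ih (i + 1)]
      · have hb : (v.2 + T == T) = false := by simp; omega
        simp [h, hb, List.filter_cons, pvOcc, ih (i + 1)]

lemma evLT_fst_le {a b : Int × Int × Int} (h : evLT a b = true) : a.1 ≤ b.1 := by
  simp only [evLT, Bool.or_eq_true, Bool.and_eq_true, decide_eq_true_eq, beq_iff_eq] at h
  omega

lemma evLT_trans {a b c : Int × Int × Int} (h1 : evLT a b = true) (h2 : evLT b c = true) :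
    evLT a c = true := by
  simp only [evLT, Bool.or_eq_true, Bool.and_eq_true, decide_eq_true_eq, beq_iff_eq] at *
  omega

lemma evLT_of_not_of_slot_ne {a b : Int × Int × Int} (hs : a.2.1 ≠ b.2.1)
    (h : evLT b a = false) : evLT a b = true := by
  simp only [evLT, Bool.or_eq_true, Bool.and_eq_true, decide_eq_true_eq, beq_iff_eq,
    Bool.or_eq_false_iff, Bool.and_eq_false_iff, decide_eq_false_iff_not, beq_eq_false_iff_ne] at *
  omega

lemma mem_insort {l : List (Int × Int × Int)} {x z : Int × Int × Int} :
    z ∈ insort l x ↔ z = x ∨ z ∈ l := by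
  induction l with
  | nil => simp [insort]
  | cons y t ih =>
    by_cases h : evLT y x
    · simp only [insort, h, if_pos, List.mem_cons, ih]
      tauto
    · simp only [insort, h, Bool.false_eq_true, if_false, List.mem_cons]

lemma insort_perm (l : List (Int × Int × Int)) (x : Int × Int × Int) :
    (insort l x).Perm (x :: l) := by
  induction l with
  | nil => simp [insort]
  | cons y t ih =>
    by_cases h : evLT y x
    · simp only [insort, h, if_pos]
      exact (ih.cons y).trans (List.Perm.swap x y t)
    · simp [insort, h]

lemma insort_pairwise {l : List (Int × Int × Int)} {x : Int × Int × Int}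
    (hl : l.Pairwise (fun a b => evLT a b = true))
    (hs : ∀ y ∈ l, y.2.1 ≠ x.2.1) :
    (insort l x).Pairwise (fun a b => evLT a b = true) := by
  induction l with
  | nil => simp [insort]
  | cons y t ih =>
    rcases List.pairwise_cons.mp hl with ⟨hy, ht⟩
    by_cases h : evLT y x
    · simp only [insort, h, if_pos]
      refine List.pairwise_cons.mpr ⟨?_, ih ht (fun z hz => hs z (List.mem_cons_of_mem _ hz))⟩
      intro z hz
      rcases mem_insort.mp hz with rfl | hz
      · exact h
      · exact hy z hz
    · simp only [insort, h, Bool.false_eq_true, if_false]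
      have hxy : evLT x y = true :=
        evLT_of_not_of_slot_ne (fun he => (hs y (List.mem_cons_self)) he.symm) (by simpa using h)
      refine List.pairwise_cons.mpr ⟨?_, hl⟩
      intro z hz
      rcases List.mem_cons.mp hz with rfl | hz
      · exact hxy
      · exact evLT_trans hxy (hy z hz)

lemma foldl_insort_perm (news : List (Int × Int × Int)) :
    ∀ ev : List (Int × Int × Int), (news.foldl insort ev).Perm (news ++ ev) := by
  induction news with
  | nil => intro ev; simp
  | cons x t ih =>
    intro ev
    have h1 := ih (insort ev x)
    have h3 : (t ++ insort ev x).Perm (t ++ (x :: ev)) := List.Perm.append_left t (insort_perm ev x)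
    simpa using h1.trans (h3.trans List.perm_middle)

lemma foldl_insort_pairwise (news : List (Int × Int × Int)) :
    ∀ ev : List (Int × Int × Int),
      ev.Pairwise (fun a b => evLT a b = true) →
      news.Pairwise (fun a b => a.2.1 ≠ b.2.1) →
      (∀ a ∈ news, ∀ b ∈ ev, b.2.1 ≠ a.2.1) →
      (news.foldl insort ev).Pairwise (fun a b => evLT a b = true) := by
  induction news with
  | nil => intro ev h _ _; simpa using h
  | cons x t ih =>
    intro ev hev hnews hdisj
    rcases List.pairwise_cons.mp hnews with ⟨hx, ht⟩
    simp only [List.foldl_cons]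
    refine ih (insort ev x) (insort_pairwise hev (fun y hy => hdisj x List.mem_cons_self y hy)) ht ?_
    intro a ha b hb
    rcases mem_insort.mp hb with rfl | hb
    · exact hx a ha
    · exact hdisj a (List.mem_cons_of_mem _ ha) b hb


lemma getShortest_spec (s : List (Option (Int × Int))) (h : s.filterMap id ≠ []) :
    (∃ v ∈ s.filterMap id, getShortest s = v.2) ∧ (∀ v ∈ s.filterMap id, getShortest s ≤ v.2) := by
  unfold getShortest
  cases hm : PySem.List.min? (s.filterMap id) (fun v => v.2) with
  | none => exact absurd ((PySem.List.min?_eq_none_iff _ _).mp hm) h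
  | some m =>
    exact ⟨⟨m, PySem.List.min?_mem hm, rfl⟩, fun v hv => PySem.List.min?_isMin hm v hv⟩

lemma takeWhile_dropWhile_filter {l : List (Int × Int × Int)} {c : Int}
    (hp : l.Pairwise fun a b => a.1 ≤ b.1) (hlb : ∀ x ∈ l, c ≤ x.1) :
    l.takeWhile (fun x => x.1 == c) = l.filter (fun x => x.1 == c) ∧
    l.dropWhile (fun x => x.1 == c) = l.filter (fun x => !(x.1 == c)) := by
  induction l with
  | nil => simp
  | cons y t ih =>
    rcases List.pairwise_cons.mp hp with ⟨hy, ht⟩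
    by_cases h : y.1 = c
    · have := ih ht (fun x hx => hlb x (List.mem_cons_of_mem _ hx))
      simp [List.takeWhile_cons, List.dropWhile_cons, List.filter_cons, h, this.1, this.2]
    · have hlt : c < y.1 := lt_of_le_of_ne (hlb y List.mem_cons_self) (fun he => h he.symm)
      have hall : ∀ x ∈ y :: t, ¬((fun x : Int × Int × Int => x.1 == c) x = true) := by
        intro x hx
        rcases List.mem_cons.mp hx with rfl | hx
        · simp; omega
        · have := hy x hx; simp; omega
      constructor
      · rw [List.filter_eq_nil_iff.mpr hall]
        simp only [List.takeWhile_cons]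
        have : (y.1 == c) = false := by simp; omega
        simp [this]
      · rw [List.filter_eq_self.mpr (fun a ha => by simpa using hall a ha)]
        simp only [List.dropWhile_cons]
        have : (y.1 == c) = false := by simp; omega
        simp [this]

lemma fill_corr (jobs : List (Int × Int)) :
    ∀ (s : List (Option (Int × Int))) (p : Nat),
      fillSpaces s ((jobs.drop p).reverse) =
        ((pvFillP jobs s p).1, (jobs.drop (pvFillP jobs s p).2).reverse) := by
  intro s
  induction s with
  | nil => intro p; simp [fillSpaces, pvFillP]
  | cons sp ss ih =>
    intro p
    by_cases hp : p < jobs.length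
    · have hlen : ¬ ((jobs.drop p).reverse.length < 1) := by
        simp [List.length_reverse, List.length_drop]; omega
      have hdrop : jobs.drop p = jobs[p] :: jobs.drop (p + 1) := List.drop_eq_getElem_cons hp
      have hrev : (jobs.drop p).reverse = (jobs.drop (p + 1)).reverse ++ [jobs[p]] := by
        rw [hdrop]; simp
      cases sp with
      | none =>
        simp only [fillSpaces, hlen, if_neg, pvFillP, hp, if_pos]
        rw [hrev]
        rw [List.getLastD_concat, List.dropLast_concat]
        rw [← hrev]  -- no longer needed form; keep q' as (drop (p+1)).reverse
        rw [hrev]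
        have := ih (p + 1)
        simp only [this]
        simp [List.getElem?_eq_getElem hp]
      | some v =>
        simp only [fillSpaces, hlen, if_neg, pvFillP, hp, if_pos]
        have := ih p
        simp only [this]
        simp
    · have hnil : jobs.drop p = [] := by
        rw [List.drop_eq_nil_iff]; omega
      have hlen : ((jobs.drop p).reverse.length < 1) := by simp [hnil]
      have hz : jobs.length - p = 0 := by omega
      cases sp with
      | none => simp [fillSpaces, hlen, pvFillP, hp, hz]
      | some v => simp [fillSpaces, hlen, pvFillP, hp, hz]

lemma fillP_ge {jobs : List (Int × Int)} {s : List (Option (Int × Int))} {p : Nat}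
    (h : ¬ p < jobs.length) : pvFillP jobs s p = (s, p) := by
  cases s with
  | nil => simp [pvFillP]
  | cons sp ss => cases sp <;> simp [pvFillP, h]

lemma assigns_ge {jobs : List (Int × Int)} {c0 : Int} {sl : List Int} {p : Nat}
    (h : ¬ p < jobs.length) : pvAssigns jobs c0 sl p = ([], p) := by
  cases sl with
  | nil => simp [pvAssigns]
  | cons a t => simp [pvAssigns, h]

lemma fillP_occ (jobs : List (Int × Int)) (c0 : Int) :
    ∀ (s : List (Option (Int × Int))) (p : Nat) (i : Int),
      (pvOcc ((pvFillP jobs s p).1) c0 i).Perm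
        (pvOcc s c0 i ++ (pvAssigns jobs c0 (pvNones s i) p).1) ∧
      (pvFillP jobs s p).2 = (pvAssigns jobs c0 (pvNones s i) p).2 := by
  intro s
  induction s with
  | nil => intro p i; simp [pvFillP, pvOcc, pvNones, pvAssigns]
  | cons sp ss ih =>
    intro p i
    by_cases hp : p < jobs.length
    · cases sp with
      | none =>
        have := ih (p + 1) (i + 1)
        simp only [pvFillP, hp, if_pos, pvOcc, pvNones, pvAssigns]
        constructor
        · refine List.Perm.trans (List.Perm.cons _ this.1) ?_
          have hc : (jobs.getD p (0, 0)).2 + c0 = c0 + (jobs.getD p (0, 0)).2 := by ring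
          rw [hc]
          exact List.perm_middle.symm
        · exact this.2
      | some v =>
        have := ih p (i + 1)
        simp only [pvFillP, hp, if_pos, pvOcc, pvNones, pvAssigns]
        exact ⟨List.Perm.cons _ this.1, this.2⟩
    · rw [fillP_ge hp]
      cases sp with
      | none =>
        simp only [pvOcc, pvNones, pvAssigns, hp, if_neg]
        simp
      | some v =>
        simp only [pvOcc, pvNones]
        rw [assigns_ge hp]
        constructor
        · simp [assigns_ge hp]
        · simp [assigns_ge hp]

lemma fillP_guard (jobs : List (Int × Int)) :
    ∀ (s : List (Option (Int × Int))) (p : Nat),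
      (pvFillP jobs s p).2 < jobs.length →
      ∀ o ∈ (pvFillP jobs s p).1, o.isSome = true := by
  intro s
  induction s with
  | nil => intro p _; simp [pvFillP]
  | cons sp ss ih =>
    intro p hlt
    by_cases hp : p < jobs.length
    · cases sp with
      | none =>
        simp only [pvFillP, hp, if_pos] at hlt ⊢
        intro o ho
        rcases List.mem_cons.mp ho with rfl | ho
        · rfl
        · exact ih (p + 1) hlt o ho
      | some v =>
        simp only [pvFillP, hp, if_pos] at hlt ⊢
        intro o ho
        rcases List.mem_cons.mp ho with rfl | ho
        · rfl
        · exact ih p hlt o ho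
    · rw [fillP_ge hp] at hlt ⊢
      omega

lemma assigns_mem_slot {jobs : List (Int × Int)} {c0 : Int} :
    ∀ {sl : List Int} {p : Nat} {a : Int × Int × Int},
      a ∈ (pvAssigns jobs c0 sl p).1 → a.2.1 ∈ sl := by
  intro sl
  induction sl with
  | nil => intro p a h; simp [pvAssigns] at h
  | cons x t ih =>
    intro p a h
    by_cases hp : p < jobs.length
    · simp only [pvAssigns, hp, if_pos, List.mem_cons] at h
      rcases h with rfl | h
      · simp
      · exact List.mem_cons_of_mem _ (ih h)
    · simp [pvAssigns, hp] at h

lemma assigns_slots_pairwise {jobs : List (Int × Int)} {c0 : Int} :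
    ∀ {sl : List Int} {p : Nat},
      sl.Pairwise (· ≠ ·) →
      (pvAssigns jobs c0 sl p).1.Pairwise (fun a b => a.2.1 ≠ b.2.1) := by
  intro sl
  induction sl with
  | nil => intro p _; simp [pvAssigns]
  | cons x t ih =>
    intro p hsl
    rcases List.pairwise_cons.mp hsl with ⟨hx, ht⟩
    by_cases hp : p < jobs.length
    · simp only [pvAssigns, hp, if_pos]
      refine List.pairwise_cons.mpr ⟨?_, ih ht⟩
      intro b hb
      exact hx b.2.1 (assigns_mem_slot hb)
    · simp [pvAssigns, hp]

lemma nones_collect (T : Int) :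
    ∀ (s : List (Option (Int × Int))) (i : Int),
      (∀ o ∈ s, o.isSome = true) →
      pvNones (collectA s).2 i =
        ((pvOcc s T i).filter (fun e => e.1 == T)).map (fun e => e.2.1) := by
  intro s
  induction s with
  | nil => intro i _; simp [collectA, pvNones, pvOcc]
  | cons sp ss ih =>
    intro i hall
    cases sp with
    | none => simpa using hall none List.mem_cons_self
    | some v =>
      have hrec := ih (i + 1) (fun o ho => hall o (List.mem_cons_of_mem _ ho))
      by_cases h : v.2 = 0
      · have hb : (v.2 + T == T) = true := by simp [h]
        simp [collectA, h, pvNones, pvOcc, List.filter_cons, hb, hrec]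
      · have hb : (v.2 + T == T) = false := by simp; omega
        simp [collectA, h, pvNones, pvOcc, List.filter_cons, hb, hrec]

lemma pass_allsome {s : List (Option (Int × Int))} {t : Int}
    (h : ∀ o ∈ s, o.isSome = true) :
    ∀ o ∈ passCoffee s t, o.isSome = true := by
  intro o ho
  rcases List.mem_map.mp ho with ⟨o', ho', rfl⟩
  have := h o' ho'
  cases o' with
  | none => simp at this
  | some v => simp

lemma fill_replicate (jobs : List (Int × Int)) :
    ∀ (n a : Nat),
      pvOcc ((pvFillP jobs (List.replicate n none) a).1) 0 (a : Int) =
        (List.range' a (min n (jobs.length - a))).map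
          (fun sl => ((jobs.getD sl (0, 0)).2, (sl : Int), (jobs.getD sl (0, 0)).1)) ∧
      (pvFillP jobs (List.replicate n none) a).2 = a + min n (jobs.length - a) := by
  intro n
  induction n with
  | zero => intro a; simp [pvFillP, pvOcc]
  | succ n ih =>
    intro a
    rw [List.replicate_succ]
    by_cases hp : a < jobs.length
    · have hrec := ih (a + 1)
      simp only [pvFillP, hp, if_pos, pvOcc]
      have hmin : min (n + 1) (jobs.length - a) = min n (jobs.length - (a + 1)) + 1 := by omega
      rw [hmin, List.range'_succ]
      constructor
      · push_cast
        simp only [List.map_cons]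
        rw [← hrec.1]
        simp
      · rw [hrec.2]; omega
    · rw [fillP_ge hp]
      have hocc : pvOcc ((none :: List.replicate n none : List (Option (Int × Int)))) 0 (a : Int) = [] := by
        rw [pvOcc_nil_iff]
        simp [areSpacesEmpty]
      have hz : min (n + 1) (jobs.length - a) = 0 := by omega
      simp [hocc, hz]


lemma foldB (jobs : List (Int × Int)) (c0 : Int) :
    ∀ (fin ev : List (Int × Int × Int)) (p : Nat) (ans : List Int),
      fin.foldl (fun (st : List (Int × Int × Int) × Nat × List Int) x =>
          let ans' := st.2.2 ++ [x.2.2]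
          if st.2.1 < jobs.length then
            let j := jobs.getD st.2.1 (0, 0)
            (insort st.1 (c0 + j.2, x.2.1, j.1), st.2.1 + 1, ans')
          else (st.1, st.2.1, ans')) (ev, p, ans) =
        ((pvAssigns jobs c0 (fin.map (fun x => x.2.1)) p).1.foldl insort ev,
         (pvAssigns jobs c0 (fin.map (fun x => x.2.1)) p).2,
         ans ++ fin.map (fun x => x.2.2)) := by
  intro fin
  induction fin with
  | nil => intro ev p ans; simp [pvAssigns]
  | cons x t ih =>
    intro ev p ans
    by_cases hp : p < jobs.length
    · simp only [List.foldl_cons, List.map_cons]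
      rw [show (pvAssigns jobs c0 (x.2.1 :: t.map (fun x => x.2.1)) p) =
        ((c0 + (jobs.getD p (0, 0)).2, x.2.1, (jobs.getD p (0, 0)).1) ::
          (pvAssigns jobs c0 (t.map (fun x => x.2.1)) (p + 1)).1,
          (pvAssigns jobs c0 (t.map (fun x => x.2.1)) (p + 1)).2) from by
        simp [pvAssigns, hp]]
      simp only [hp, if_pos, List.foldl_cons]
      rw [ih]
      simp
    · simp only [List.foldl_cons, List.map_cons]
      rw [assigns_ge hp]
      simp only [hp, if_neg, Bool.false_eq_true, if_false]
      rw [ih]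
      rw [assigns_ge hp]
      simp

lemma pvMain (jobs : List (Int × Int)) :
    ∀ (fuel : Nat) (s : List (Option (Int × Int))) (ev : List (Int × Int × Int)) (p : Nat) (T : Int) (ans : List Int),
      pvInv jobs s ev p T →
      loopA fuel s ((jobs.drop p).reverse) ans = loopB jobs fuel ev p ans := by
  intro fuel
  induction fuel with
  | zero => intro s ev p T ans _; simp [loopA, loopB]
  | succ fuel ih =>
    intro s ev p T ans hinv
    obtain ⟨hsort, hperm, hguard⟩ := hinv
    by_cases hemp : areSpacesEmpty s = true
    · have hocc : pvOcc s T 0 = [] := (pvOcc_nil_iff s T 0).mpr hemp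
      have hev : ev = [] := by
        rw [hocc] at hperm
        exact hperm.symm.eq_nil
      subst hev
      simp [loopA, loopB, hemp]
    · have hoccne : pvOcc s T 0 ≠ [] := fun h => hemp ((pvOcc_nil_iff s T 0).mp h)
      obtain ⟨e, es, rfl⟩ : ∃ e es, ev = e :: es := by
        cases hx : ev with
        | nil => rw [hx] at hperm; exact absurd hperm.eq_nil hoccne
        | cons e es => exact ⟨e, es, rfl⟩
      set M := jobs.length with hM
      set c0 := e.1 with hc0
      -- A's minimum equals the head completion time shifted by T
      have hfm : s.filterMap id ≠ [] := by
        intro hf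
        have hmap := pvOcc_map_filterMap s T 0
        rw [hf] at hmap
        exact hoccne (List.map_eq_nil_iff.mp hmap)
      obtain ⟨⟨vmin, hvmem, hveq⟩, hmle⟩ := getShortest_spec s hfm
      set m := getShortest s with hm
      have hlb : ∀ x ∈ e :: es, c0 ≤ x.1 := by
        intro x hx
        rcases List.mem_cons.mp hx with rfl | hx
        · exact le_refl _
        · exact evLT_fst_le ((List.pairwise_cons.mp hsort).1 x hx)
      have hTm : T + m = c0 := by
        have h1 : c0 ≤ T + m := by
          have : vmin ∈ (pvOcc s T 0).map (fun e => (e.2.2, e.1 - T)) := by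
            rw [pvOcc_map_filterMap]; exact hvmem
          rcases List.mem_map.mp this with ⟨oe, hoe, hfe⟩
          have : oe ∈ e :: es := hperm.mem_iff.mp hoe
          have h2 := hlb oe this
          have : oe.1 - T = vmin.2 := congrArg Prod.snd hfe
          omega
        have h2 : T + m ≤ c0 := by
          have he : e ∈ pvOcc s T 0 := hperm.mem_iff.mpr List.mem_cons_self
          have : (e.2.2, e.1 - T) ∈ s.filterMap id := by
            rw [← pvOcc_map_filterMap s T 0]
            exact List.mem_map_of_mem he
          have := hmle _ this
          simp only at this
          omega
        omega
      -- shapes of fin and rest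
      have hple : (e :: es).Pairwise (fun a b => a.1 ≤ b.1) :=
        hsort.imp (fun h => evLT_fst_le h)
      obtain ⟨hfin, hrest⟩ := takeWhile_dropWhile_filter hple hlb
      set fin := (e :: es).takeWhile (fun x => x.1 == c0) with hfin_def
      set rest := (e :: es).dropWhile (fun x => x.1 == c0) with hrest_def
      -- A-side round pieces
      set s1 := passCoffee s m with hs1
      have hocc1 : pvOcc s1 c0 0 = pvOcc s T 0 := by
        rw [hs1, ← hTm]
        exact pvOcc_pass s m T 0
      set F := (pvOcc s1 c0 0).filter (fun x => x.1 == c0) with hF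
      -- slot facts
      have hoccsp : (pvOcc s T 0).Pairwise (fun a b => a.2.1 < b.2.1) := pvOcc_slot_pairwise s T 0
      have hnd_ev : (e :: es).Pairwise (fun a b => a.2.1 ≠ b.2.1) := by
        exact (List.Perm.pairwise_iff (fun h => Ne.symm h) hperm).mp
          (hoccsp.imp (fun h => ne_of_lt h))
      have hFperm : F.Perm fin := by
        rw [hF, hocc1, hfin]
        exact hperm.filter _
      have hFsp : F.Pairwise (fun a b => a.2.1 < b.2.1) := by
        rw [hF, hocc1]
        exact hoccsp.sublist List.filter_sublist
      have hfinsp : fin.Pairwise (fun a b => a.2.1 < b.2.1) := by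
        have hsub : fin.Sublist (e :: es) := by rw [hfin]; exact List.filter_sublist
        have h1 : fin.Pairwise (fun a b => evLT a b = true) := hsort.sublist hsub
        have h2 : fin.Pairwise (fun a b => a.2.1 ≠ b.2.1) := hnd_ev.sublist hsub
        have hc : ∀ x ∈ fin, x.1 = c0 := by
          intro x hx
          rw [hfin] at hx
          have := List.of_mem_filter hx
          simpa using this
        have := List.Pairwise.and h1 h2
        refine this.imp_of_mem ?_
        intro a b ha hb hab
        rcases hab with ⟨hab1, hab2⟩
        have hca := hc a ha
        have hcb := hc b hb
        simp only [evLT, Bool.or_eq_true, Bool.and_eq_true, decide_eq_true_eq, beq_iff_eq] at hab1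
        omega
      have hfinF : fin = F := by
        have e1 : PySem.List.sorted F (fun x => x.2.1) = fin :=
          PySem.List.sorted_eq_of_perm_of_pairwise_lt _ _ _ hFperm.symm hfinsp
        have e2 : PySem.List.sorted F (fun x => x.2.1) = F :=
          PySem.List.sorted_eq_of_perm_of_pairwise_lt _ _ _ (List.Perm.refl F) hFsp
        rw [← e1, e2]
      -- collect
      set r := collectA s1 with hr
      have hr1 : r.1 = fin.map (fun x => x.2.2) := by
        rw [hr, pvCollect_fst s1 c0 0, hfinF, hF]
      have hr2occ : (pvOcc r.2 c0 0).Perm rest := by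
        rw [hr, pvCollect_snd s1 c0 0, hocc1, hrest]
        exact hperm.filter _
      have hrestsort : rest.Pairwise (fun a b => evLT a b = true) :=
        hsort.sublist (by rw [hrest_def]; exact List.dropWhile_sublist _)
      -- B-side fold
      have hfold := foldB jobs c0 fin rest p ans
      set news := (pvAssigns jobs c0 (fin.map (fun x => x.2.1)) p).1 with hnews
      set p' := (pvAssigns jobs c0 (fin.map (fun x => x.2.1)) p).2 with hp'
      -- A-side fill
      have hfillc := fill_corr jobs r.2 p
      have hfillocc := fillP_occ jobs c0 r.2 p 0
      -- new-state invariant pieces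
      have hdisjoint : ∀ a ∈ fin, ∀ b ∈ rest, a.2.1 ≠ b.2.1 := by
        have hsplit : fin ++ rest = e :: es := List.takeWhile_append_dropWhile
        have := hnd_ev
        rw [← hsplit] at this
        exact fun a ha b hb => (List.pairwise_append.mp this).2.2 a ha b hb
      have hnews_slots : ∀ a ∈ news, a.2.1 ∈ fin.map (fun x => x.2.1) :=
        fun a ha => assigns_mem_slot ha
      have hnews_pw : news.Pairwise (fun a b => a.2.1 ≠ b.2.1) :=
        assigns_slots_pairwise (by
          refine List.Pairwise.map _ ?_ (hfinsp.imp (fun h => ne_of_lt h))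
          intro a b h
          exact h)
      have hsort' : (news.foldl insort rest).Pairwise (fun a b => evLT a b = true) := by
        refine foldl_insort_pairwise news rest hrestsort hnews_pw ?_
        intro a ha b hb
        rcases List.mem_map.mp (hnews_slots a ha) with ⟨x, hx, hxa⟩
        rw [← hxa]
        exact fun h => (hdisjoint x hx b hb) h.symm
      -- invariant: occ of filled state ~ folded events
      have hnones_eq : pvAssigns jobs c0 (pvNones r.2 0) p = pvAssigns jobs c0 (fin.map (fun x => x.2.1)) p := by
        by_cases hp : p < M
        · have hall : ∀ o ∈ s, o.isSome = true := hguard hp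
          have hall1 : ∀ o ∈ s1, o.isSome = true := pass_allsome hall
          have := nones_collect c0 s1 0 hall1
          rw [hr, this, ← hF, ← hfinF]
        · rw [assigns_ge hp, assigns_ge hp]
      have hperm' : (pvOcc ((pvFillP jobs r.2 p).1) c0 0).Perm (news.foldl insort rest) := by
        have h1 := hfillocc.1
        rw [hnones_eq] at h1
        refine h1.trans ?_
        have h2 : (pvOcc r.2 c0 0 ++ news).Perm (news ++ pvOcc r.2 c0 0) := List.perm_append_comm
        refine h2.trans ?_
        have h3 : (news ++ pvOcc r.2 c0 0).Perm (news ++ rest) := List.Perm.append_left news hr2occ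
        exact h3.trans (foldl_insort_perm news rest).symm
      have hpA : (pvFillP jobs r.2 p).2 = p' := by
        rw [hfillocc.2, hnones_eq]
      have hguard' : p' < M → ∀ o ∈ (pvFillP jobs r.2 p).1, o.isSome = true := by
        intro hlt
        exact fillP_guard jobs r.2 p (by rw [hpA]; exact hlt)
      -- assemble the round
      rw [show loopA (fuel + 1) s ((jobs.drop p).reverse) ans =
          loopA fuel (fillSpaces r.2 ((jobs.drop p).reverse)).1
            (fillSpaces r.2 ((jobs.drop p).reverse)).2 (ans ++ r.1) from by
        simp only [loopA, hemp, Bool.false_eq_true, if_false]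
        rfl]
      rw [show loopB jobs (fuel + 1) (e :: es) p ans =
          loopB jobs fuel (news.foldl insort rest) p' (ans ++ fin.map (fun x => x.2.2)) from by
        simp only [loopB]
        rw [hfold]]
      rw [hfillc, hr1, hpA]
      exact ih (pvFillP jobs r.2 p).1 (news.foldl insort rest) p' c0
        (ans ++ fin.map fun x => x.2.2) ⟨hsort', hperm', hguard'⟩

-- ===== VERDICT (by name: the statement is the Claim_ definition above) =====
theorem solution_spec : Claim_equal_solution := by
  unfold Claim_equal_solution Spec_solution
  intro N ct _ hpre
  have hne : ¬ ((N == 1) = true) := by simpa [Pre_solution] using hpre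
  set jobs := PySem.List.enumerate ct 1 with hjobs
  set n := N.toNat with hn
  set k := (if 0 < N then min jobs.length N.toNat else 0 : Nat) with hk
  have hkeq : k = min n (jobs.length - 0) := by
    rw [hk, hn]
    by_cases h : 0 < N
    · simp [h, Nat.min_comm]
    · have h0 : N.toNat = 0 := by omega
      simp [h, h0]
  have hfr := fill_replicate jobs n 0
  have hfc := fill_corr jobs (List.replicate n none) 0
  have hp2 : (pvFillP jobs (List.replicate n none) 0).2 = k := by
    rw [hfr.2, hkeq]
    omega
  set f : Nat → Int × Int × Int :=
    fun slot => ((jobs.getD slot (0, 0)).2, (slot : Int), (jobs.getD slot (0, 0)).1) with hf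
  have hpwf : ((List.range k).map f).Pairwise (fun a b => a.2.1 ≠ b.2.1) := by
    refine List.Pairwise.map f ?_ (List.pairwise_lt_range)
    intro a b hab
    simp only [hf]
    intro hcast
    have : (a : Int) = (b : Int) := hcast
    omega
  have hsort0 : (((List.range k).map f).foldl insort []).Pairwise (fun a b => evLT a b = true) := by
    refine foldl_insort_pairwise _ [] (by simp) hpwf (by simp)
  have hperm0 : (pvOcc (pvFillP jobs (List.replicate n none) 0).1 0 0).Perm
      (((List.range k).map f).foldl insort []) := by
    have h1 : pvOcc (pvFillP jobs (List.replicate n none) 0).1 0 0 = (List.range k).map f := by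
      have := hfr.1
      rw [← hkeq] at this
      simpa [List.range_eq_range'] using this
    rw [h1]
    have hx := foldl_insort_perm ((List.range k).map f) []
    rw [List.append_nil] at hx
    exact hx.symm
  have hguard0 : k < jobs.length → ∀ o ∈ (pvFillP jobs (List.replicate n none) 0).1, o.isSome = true :=
    fun h => fillP_guard jobs _ 0 (by rw [hp2]; exact h)
  have hmain := pvMain jobs (ct.length + 1) (pvFillP jobs (List.replicate n none) 0).1
      (((List.range k).map f).foldl insort []) k 0 [] ⟨hsort0, hperm0, hguard0⟩
  show solution N ct = solution_alt N ct
  rw [solution, solution_alt]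
  rw [if_neg hne]
  show loopA (ct.length + 1)
      (fillSpaces (List.replicate n none) jobs.reverse).1
      (fillSpaces (List.replicate n none) jobs.reverse).2 [] =
    loopB jobs (ct.length + 1)
      ((List.range k).foldl (fun ev slot => insort ev (f slot)) []) k []
  rw [show jobs.reverse = (jobs.drop 0).reverse from by rw [List.drop_zero]]
  rw [hfc, hp2]
  rw [show (List.range k).foldl (fun ev slot => insort ev (f slot)) [] =
      ((List.range k).map f).foldl insort [] from List.foldl_map.symm]
  exact hmain
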